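-- pv_equiv track=rewrite | github.com/drexlerd/Algorithms_in_Bioinformatics | feng_doolittle.py | align_group_to_group_by_group
-- ===== SOURCE A (Python) =====
-- def align_group_to_group_by_group(min_i, min_j, group1, group2, group3):
--     """Aligns group1 to group2 using group3.
--
--     Args:
--       min_i (int): index of the first sequence of group3 in group1
--       min_j (int): index of the second sequence of group3 in group2
--       group1 (list(str)): An alignment
--       group2 (list(str)): An alignment
--       group3 (list(str)): An alignment
--
--     Returns:
--       list(str): An alignment
--     """
--     result = ["" for _ in range(len(group1) + len(group2))]
--     i1 = 0  # index in alignment 1 best pairwise sequence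
--     i2 = 0  # index in alignment 2 best pairwise sequence
--     for i in range(len(group3[0])):
--         c1 = group3[0][i]
--         c2 = group3[1][i]
--         # i1 < len(group1[0]): group1 may be shorter so gap out the rest if the end is reached
--         # c1 == group1[min_i][i1]: the current symbol of the sequence in pairwise alignment matches the one in the group at index i
--         if i1 < len(group1[0]) and c1 == group1[min_i][i1]:
--             # copy alignment 1 column to result
--             for j in range(len(group1)):
--                 result[j] += group1[j][i1]
--             i1 += 1
--         else: # gap out all
--             for j in range(len(group1)):
--                 result[j] += "_"
--         if i2 < len(group2[0]) and c2 == group2[min_j][i2]: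
--             for j in range(len(group1), len(group1) + len(group2)):
--                 result[j] += group2[j-len(group1)][i2]
--             i2 += 1
--         else:
--             for j in range(len(group1), len(group1) + len(group2)):
--                 result[j] += "_"
--     return result
-- ===== SOURCE B (Python) =====
-- def align_group_to_group_by_group(min_i, min_j, group1, group2, group3):
--     """Aligns group1 to group2 using group3 (plan-based re-implementation)."""
--     if not group3[0]:
--         return ["" for _ in group1 + group2]
--     ref1, w1 = group1[min_i], len(group1[0])
--     ref2, w2 = group2[min_j], len(group2[0])
--     # One pass over the guide pair: per guide column record which source column each
--     # group emits; the sentinel column w (the appended '_') stands for a gap.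
--     plan1, plan2 = [], []
--     k1 = k2 = 0
--     for c1, c2 in zip(group3[0], group3[1]):
--         if k1 < w1 and c1 == ref1[k1]:
--             plan1.append(k1)
--             k1 += 1
--         else:
--             plan1.append(w1)
--         if k2 < w2 and c2 == ref2[k2]:
--             plan2.append(k2)
--             k2 += 1
--         else:
--             plan2.append(w2)
--     out = ["".join(map((row[:w1] + "_").__getitem__, plan1)) for row in group1]
--     out += ["".join(map((row[:w2] + "_").__getitem__, plan2)) for row in group2]
--     return out
-- ===== Notes on version B (the rewrite author's own statement) =====
-- stated objective: alternative
-- what changed: Instead of appending one character to every result row at every guide column, B makes one pass over the zipped guide pair to build a per-column 'plan' (source column index, with a sentinel column standing for a gap) for each group, then materializes each output row independently in one shot by joining the row (plus sentinel '_') indexed through its group's plan.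
-- outside the precondition, e.g. on align_group_to_group_by_group(0, 0, ['AB', 'A'], ['C'], ['ZZ', 'CC']): A returns ['__', '__', 'C_'], B raises IndexError
import Mathlib
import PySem

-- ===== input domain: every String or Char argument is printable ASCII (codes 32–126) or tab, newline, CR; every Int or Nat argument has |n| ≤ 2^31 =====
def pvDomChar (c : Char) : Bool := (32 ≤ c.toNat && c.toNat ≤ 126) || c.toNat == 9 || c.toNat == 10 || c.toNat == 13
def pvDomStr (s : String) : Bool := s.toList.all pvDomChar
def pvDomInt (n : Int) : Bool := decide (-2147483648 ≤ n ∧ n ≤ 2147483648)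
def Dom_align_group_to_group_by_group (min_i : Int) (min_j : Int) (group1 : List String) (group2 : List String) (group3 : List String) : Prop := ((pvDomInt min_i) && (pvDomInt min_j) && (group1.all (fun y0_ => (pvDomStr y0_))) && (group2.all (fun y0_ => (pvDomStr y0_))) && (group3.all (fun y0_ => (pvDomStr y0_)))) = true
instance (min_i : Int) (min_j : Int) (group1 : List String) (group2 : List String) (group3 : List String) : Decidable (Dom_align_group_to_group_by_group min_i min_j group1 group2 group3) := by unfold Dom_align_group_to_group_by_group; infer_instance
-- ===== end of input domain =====

-- B replaces A's column-by-column appending to every result row by a single pass that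
-- only records, per guide column, which source column each group emits (a "plan", with a
-- sentinel column for gaps), followed by one join per output row (objective: alternative).

-- ===== PORT A =====
-- result rows are kept as List Char (Python's s += c becomes s ++ [c]); String.mk at the end.
-- 'for j in range(len(group1)): result[j] += …' updates exactly the first len1 rows,
-- pairing result[j] with group1[j]: ported as zipWith on (result.take len1) ++ untouched rest.
def pvAStep (g30 g31 ref1 ref2 : List Char) (w1 w2 : Nat) (g1 g2 : List (List Char))
    (st : List (List Char) × Nat × Nat) (i : Nat) : List (List Char) × Nat × Nat :=
  let result := st.1
  let i1 := st.2.1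
  let i2 := st.2.2
  let c1 := g30.getD i ' '
  let c2 := g31.getD i ' '
  let len1 := g1.length
  let (result, i1) :=
    if i1 < w1 ∧ c1 = ref1.getD i1 ' ' then
      (List.zipWith (fun s row => s ++ [row.getD i1 ' ']) (result.take len1) g1 ++ result.drop len1, i1 + 1)
    else
      ((result.take len1).map (fun s => s ++ ['_']) ++ result.drop len1, i1)
  let (result, i2) :=
    if i2 < w2 ∧ c2 = ref2.getD i2 ' ' then
      (result.take len1 ++ List.zipWith (fun s row => s ++ [row.getD i2 ' ']) (result.drop len1) g2, i2 + 1)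
    else
      (result.take len1 ++ (result.drop len1).map (fun s => s ++ ['_']), i2)
  (result, i1, i2)

def align_group_to_group_by_group (min_i : Int) (min_j : Int) (group1 : List String) (group2 : List String) (group3 : List String) : List String :=
  let g1 := group1.map String.toList
  let g2 := group2.map String.toList
  let g30 := (group3.getD 0 "").toList
  let g31 := (group3.getD 1 "").toList
  let ref1 := (PySem.List.pyGetD group1 min_i "").toList
  let ref2 := (PySem.List.pyGetD group2 min_j "").toList
  let w1 := (g1.getD 0 []).length
  let w2 := (g2.getD 0 []).length
  let st := (List.range g30.length).foldl (pvAStep g30 g31 ref1 ref2 w1 w2 g1 g2)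
      (List.replicate (g1.length + g2.length) [], 0, 0)
  st.1.map String.mk

-- ===== PORT B =====
def pvRender (w : Nat) (row : List Char) (plan : List Nat) : List Char :=
  plan.map (fun k => (row.take w ++ ['_']).getD k ' ')

def pvBStep (ref1 ref2 : List Char) (w1 w2 : Nat)
    (st : List Nat × List Nat × Nat × Nat) (c : Char × Char) :
    List Nat × List Nat × Nat × Nat :=
  let (p1, k1) :=
    if st.2.2.1 < w1 ∧ c.1 = ref1.getD st.2.2.1 ' ' then (st.1 ++ [st.2.2.1], st.2.2.1 + 1)
    else (st.1 ++ [w1], st.2.2.1)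
  let (p2, k2) :=
    if st.2.2.2 < w2 ∧ c.2 = ref2.getD st.2.2.2 ' ' then (st.2.1 ++ [st.2.2.2], st.2.2.2 + 1)
    else (st.2.1 ++ [w2], st.2.2.2)
  (p1, p2, k1, k2)

def align_group_to_group_by_group_alt (min_i : Int) (min_j : Int) (group1 : List String) (group2 : List String) (group3 : List String) : List String :=
  let guide := (group3.getD 0 "").toList
  if guide = [] then (group1 ++ group2).map (fun _ => "") else
    let ref1 := (PySem.List.pyGetD group1 min_i "").toList
    let ref2 := (PySem.List.pyGetD group2 min_j "").toList
    let w1 := (group1.getD 0 "").toList.length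
    let w2 := (group2.getD 0 "").toList.length
    let st := (guide.zip (group3.getD 1 "").toList).foldl (pvBStep ref1 ref2 w1 w2) ([], [], 0, 0)
    group1.map (fun row => String.mk (pvRender w1 row.toList st.1))
      ++ group2.map (fun row => String.mk (pvRender w2 row.toList st.2.1))

-- ===== PRECONDITION & SPEC =====
-- Pre_ excludes exactly the inputs where an index access can raise in A's interleaved loop:
-- missing guide rows, a second guide row shorter than the first, empty groups / out-of-range
-- min_i, min_j, and groups whose later rows are shorter than their first row.  On ragged groups
-- or out-of-range indices A may still happen to return (the faulty access is short-circuited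
-- away, e.g. when the reference row is empty) — that survival is accidental, and B (which reads
-- the reference row up front) raises or agrees there; such inputs are excluded.
def Pre_align_group_to_group_by_group (min_i : Int) (min_j : Int) (group1 : List String) (group2 : List String) (group3 : List String) : Prop :=
  group3 ≠ [] ∧
  ((group3.getD 0 "") ≠ "" →
    1 < group3.length ∧
    (group3.getD 0 "").toList.length ≤ (group3.getD 1 "").toList.length ∧
    group1 ≠ [] ∧ group2 ≠ [] ∧
    (-(group1.length : Int) ≤ min_i ∧ min_i < group1.length) ∧
    (-(group2.length : Int) ≤ min_j ∧ min_j < group2.length) ∧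
    (∀ s ∈ group1, (group1.getD 0 "").toList.length ≤ s.toList.length) ∧
    (∀ s ∈ group2, (group2.getD 0 "").toList.length ≤ s.toList.length))

instance (min_i : Int) (min_j : Int) (group1 : List String) (group2 : List String) (group3 : List String) : Decidable (Pre_align_group_to_group_by_group min_i min_j group1 group2 group3) := by unfold Pre_align_group_to_group_by_group; infer_instance

def pvWitness_align_group_to_group_by_group : Int × Int × List String × List String × List String :=
  (0, 0, ["AB"], ["C"], ["AB", "C_"])

def Spec_align_group_to_group_by_group (min_i : Int) (min_j : Int) (group1 : List String) (group2 : List String) (group3 : List String) (out : List String) : Prop := out = align_group_to_group_by_group_alt min_i min_j group1 group2 group3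
instance (min_i : Int) (min_j : Int) (group1 : List String) (group2 : List String) (group3 : List String) (out : List String) : Decidable (Spec_align_group_to_group_by_group min_i min_j group1 group2 group3 out) := by unfold Spec_align_group_to_group_by_group; infer_instance

-- ===== CLAIM (what is proved, stated in full; the proofs are below) =====
def Claim_equal_align_group_to_group_by_group : Prop := ∀ (min_i : Int) (min_j : Int) (group1 : List String) (group2 : List String) (group3 : List String), Dom_align_group_to_group_by_group min_i min_j group1 group2 group3 → Pre_align_group_to_group_by_group min_i min_j group1 group2 group3 → Spec_align_group_to_group_by_group min_i min_j group1 group2 group3 (align_group_to_group_by_group min_i min_j group1 group2 group3)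

-- ===== LEMMAS AND PROOFS =====

-- proof-only recursion computing B's plans and final counters
def pvPlanRec (ref : List Char) (w : Nat) : List Char → Nat → List Nat
  | [], _ => []
  | c :: cs, k =>
    if k < w ∧ c = ref.getD k ' ' then k :: pvPlanRec ref w cs (k + 1)
    else w :: pvPlanRec ref w cs k

def pvKRec (ref : List Char) (w : Nat) : List Char → Nat → Nat
  | [], k => k
  | c :: cs, k =>
    if k < w ∧ c = ref.getD k ' ' then pvKRec ref w cs (k + 1) else pvKRec ref w cs k

-- pvAStep's body with the two guide characters passed directly (pairing step for the zip form)
def pvACoreZ (ref1 ref2 : List Char) (w1 w2 : Nat) (g1 g2 : List (List Char))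
    (st : List (List Char) × Nat × Nat) (c : Char × Char) : List (List Char) × Nat × Nat :=
  let result := st.1
  let i1 := st.2.1
  let i2 := st.2.2
  let len1 := g1.length
  let (result, i1) :=
    if i1 < w1 ∧ c.1 = ref1.getD i1 ' ' then
      (List.zipWith (fun s row => s ++ [row.getD i1 ' ']) (result.take len1) g1 ++ result.drop len1, i1 + 1)
    else
      ((result.take len1).map (fun s => s ++ ['_']) ++ result.drop len1, i1)
  let (result, i2) :=
    if i2 < w2 ∧ c.2 = ref2.getD i2 ' ' then
      (result.take len1 ++ List.zipWith (fun s row => s ++ [row.getD i2 ' ']) (result.drop len1) g2, i2 + 1)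
    else
      (result.take len1 ++ (result.drop len1).map (fun s => s ++ ['_']), i2)
  (result, i1, i2)

-- folding indices 0..len l1-1 while reading l1[i], l2[i] = folding over the zipped lists
theorem pvFoldRangeZip {σ : Type} (f : σ → Char × Char → σ) :
    ∀ (l1 l2 : List Char), l1.length ≤ l2.length → ∀ (init : σ),
    (List.range l1.length).foldl (fun st i => f st (l1.getD i ' ', l2.getD i ' ')) init
      = (l1.zip l2).foldl f init := by
  intro l1
  induction l1 with
  | nil => intro l2 h init; simp
  | cons c cs ih =>
    intro l2 h init
    cases l2 with
    | nil => simp at h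
    | cons d ds =>
      simp only [List.length_cons, List.range_succ_eq_map, List.foldl_cons, List.foldl_map,
        List.getD_cons_zero, List.getD_cons_succ, List.zip_cons_cons]
      exact ih ds (by simpa using h) _

theorem pvAStep_eq_core (g30 g31 ref1 ref2 : List Char) (w1 w2 : Nat) (g1 g2 : List (List Char)) :
    pvAStep g30 g31 ref1 ref2 w1 w2 g1 g2
      = fun st i => pvACoreZ ref1 ref2 w1 w2 g1 g2 st (g30.getD i ' ', g31.getD i ' ') := by
  funext st i
  rfl

-- B's append-loop computes the recursively defined plans and counters
theorem pvBfold (ref1 ref2 : List Char) (w1 w2 : Nat) :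
    ∀ (cs : List (Char × Char)) (p1 p2 : List Nat) (k1 k2 : Nat),
    cs.foldl (pvBStep ref1 ref2 w1 w2) (p1, p2, k1, k2)
      = (p1 ++ pvPlanRec ref1 w1 (cs.map Prod.fst) k1,
         p2 ++ pvPlanRec ref2 w2 (cs.map Prod.snd) k2,
         pvKRec ref1 w1 (cs.map Prod.fst) k1,
         pvKRec ref2 w2 (cs.map Prod.snd) k2) := by
  intro cs
  induction cs with
  | nil => intro p1 p2 k1 k2; simp [pvPlanRec, pvKRec]
  | cons c cs ih =>
    intro p1 p2 k1 k2
    simp only [List.foldl_cons, List.map_cons, pvPlanRec, pvKRec, pvBStep]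
    split_ifs with h1 h2 h2 <;> simp [ih]

theorem pvZipId : ∀ (r g : List (List Char)), r.length = g.length →
    List.zipWith (fun s (_ : List Char) => s) r g = r := by
  intro r
  induction r with
  | nil => intro g h; simp
  | cons a r ih =>
    intro g h
    cases g with
    | nil => simp at h
    | cons b g => simpa using ih g (by simpa using h)

-- the sentinel column w of row[:w] ++ "_" reads back the pushed characters
theorem pvSentinelHit (row : List Char) (w k : Nat) (hk : k < w) (hw : w ≤ row.length) :
    (row.take w ++ ['_']).getD k ' ' = row.getD k ' ' := by
  have hkr : k < row.length := lt_of_lt_of_le hk hw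
  have hlen : (row.take w).length = w := by simp [Nat.min_eq_left hw]
  rw [List.getD_append _ _ _ _ (by omega), List.getD_eq_getElem _ _ hkr,
    List.getD_eq_getElem _ _ (by omega)]
  simp [List.getElem_take]

theorem pvSentinelGap (row : List Char) (w : Nat) (hw : w ≤ row.length) :
    (row.take w ++ ['_']).getD w ' ' = '_' := by
  have hlen : (row.take w).length = w := by simp [Nat.min_eq_left hw]
  rw [List.getD_append_right _ _ _ _ (by omega), hlen]
  simp

theorem pvZipComposeSome (k w : Nat) (p : List Nat) (hk : k < w) :
    ∀ (r g : List (List Char)), (∀ row ∈ g, w ≤ row.length) →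
    List.zipWith (fun s row => s ++ pvRender w row p)
        (List.zipWith (fun s row => s ++ [row.getD k ' ']) r g) g
      = List.zipWith (fun s row => s ++ pvRender w row (k :: p)) r g := by
  intro r
  induction r with
  | nil => intro g _; simp
  | cons a r ih =>
    intro g hg
    cases g with
    | nil => simp
    | cons b g =>
      simp only [List.zipWith_cons_cons]
      rw [ih g (fun row hrow => hg row (List.mem_cons_of_mem _ hrow))]
      congr 1
      simp only [pvRender, List.map_cons, List.append_assoc, List.singleton_append]
      rw [pvSentinelHit b w k hk (hg b List.mem_cons_self)]

theorem pvZipComposeGap (w : Nat) (p : List Nat) :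
    ∀ (r g : List (List Char)), r.length = g.length → (∀ row ∈ g, w ≤ row.length) →
    List.zipWith (fun s row => s ++ pvRender w row p) (r.map (fun s => s ++ ['_'])) g
      = List.zipWith (fun s row => s ++ pvRender w row (w :: p)) r g := by
  intro r
  induction r with
  | nil => intro g h _; simp
  | cons a r ih =>
    intro g h hg
    cases g with
    | nil => simp at h
    | cons b g =>
      simp only [List.map_cons, List.zipWith_cons_cons]
      rw [ih g (by simpa using h) (fun row hrow => hg row (List.mem_cons_of_mem _ hrow))]
      congr 1
      simp only [pvRender, List.map_cons, List.append_assoc, List.singleton_append]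
      rw [pvSentinelGap b w (hg b List.mem_cons_self)]

-- the invariant of A's loop: the two halves of result accumulate exactly B's rendered plans
theorem pvAfold (ref1 ref2 : List Char) (w1 w2 : Nat) (g1 g2 : List (List Char))
    (hG1 : ∀ row ∈ g1, w1 ≤ row.length) (hG2 : ∀ row ∈ g2, w2 ≤ row.length) :
    ∀ (cs : List (Char × Char)) (r1 r2 : List (List Char)) (k1 k2 : Nat),
    r1.length = g1.length → r2.length = g2.length →
    cs.foldl (pvACoreZ ref1 ref2 w1 w2 g1 g2) (r1 ++ r2, k1, k2)
      = (List.zipWith (fun s row => s ++ pvRender w1 row (pvPlanRec ref1 w1 (cs.map Prod.fst) k1)) r1 g1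
         ++ List.zipWith (fun s row => s ++ pvRender w2 row (pvPlanRec ref2 w2 (cs.map Prod.snd) k2)) r2 g2,
         pvKRec ref1 w1 (cs.map Prod.fst) k1,
         pvKRec ref2 w2 (cs.map Prod.snd) k2) := by
  intro cs
  induction cs with
  | nil =>
    intro r1 r2 k1 k2 h1 h2
    simp only [List.foldl_nil, List.map_nil, pvPlanRec, pvKRec, pvRender, List.append_nil]
    rw [pvZipId r1 g1 h1, pvZipId r2 g2 h2]
  | cons c cs ih =>
    intro r1 r2 k1 k2 h1 h2
    have htake : (r1 ++ r2).take g1.length = r1 := by rw [← h1]; exact List.take_left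
    have hdrop : (r1 ++ r2).drop g1.length = r2 := by rw [← h1]; exact List.drop_left
    simp only [List.foldl_cons, List.map_cons, pvPlanRec, pvKRec]
    simp only [pvACoreZ, htake, hdrop]
    set r1' := if k1 < w1 ∧ c.1 = ref1.getD k1 ' '
      then List.zipWith (fun s row => s ++ [row.getD k1 ' ']) r1 g1
      else r1.map (fun s => s ++ ['_']) with hr1'
    set k1' := if k1 < w1 ∧ c.1 = ref1.getD k1 ' ' then k1 + 1 else k1 with hk1'
    have h1' : r1'.length = g1.length := by
      rw [hr1']; split <;> simp [h1]
    have htake' : (r1' ++ r2).take g1.length = r1' := by rw [← h1']; exact List.take_left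
    have hdrop' : (r1' ++ r2).drop g1.length = r2 := by rw [← h1']; exact List.drop_left
    set r2' := if k2 < w2 ∧ c.2 = ref2.getD k2 ' '
      then List.zipWith (fun s row => s ++ [row.getD k2 ' ']) r2 g2
      else r2.map (fun s => s ++ ['_']) with hr2'
    set k2' := if k2 < w2 ∧ c.2 = ref2.getD k2 ' ' then k2 + 1 else k2 with hk2'
    have h2' : r2'.length = g2.length := by
      rw [hr2']; split <;> simp [h2]
    have hstep : (if k1 < w1 ∧ c.1 = ref1.getD k1 ' '
        then (List.zipWith (fun s row => s ++ [row.getD k1 ' ']) r1 g1 ++ r2, k1 + 1)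
        else (r1.map (fun s => s ++ ['_']) ++ r2, k1)) = (r1' ++ r2, k1') := by
      rw [hr1', hk1']; split <;> rfl
    rw [hstep]
    simp only [htake', hdrop']
    have hstep2 : (if k2 < w2 ∧ c.2 = ref2.getD k2 ' '
        then (r1' ++ List.zipWith (fun s row => s ++ [row.getD k2 ' ']) r2 g2, k2 + 1)
        else (r1' ++ r2.map (fun s => s ++ ['_']), k2)) = (r1' ++ r2', k2') := by
      rw [hr2', hk2']; split <;> rfl
    rw [hstep2, ih r1' r2' k1' k2' h1' h2']
    by_cases hc1 : k1 < w1 ∧ c.1 = ref1.getD k1 ' ' <;>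
      by_cases hc2 : k2 < w2 ∧ c.2 = ref2.getD k2 ' ' <;>
        simp only [hr1', hk1', hr2', hk2', hc1, hc2, and_self, if_true, if_false]
    · rw [pvZipComposeSome _ _ _ hc1.1 _ _ hG1, pvZipComposeSome _ _ _ hc2.1 _ _ hG2]
    · rw [pvZipComposeSome _ _ _ hc1.1 _ _ hG1, pvZipComposeGap _ _ r2 g2 h2 hG2]
    · rw [pvZipComposeGap _ _ r1 g1 h1 hG1, pvZipComposeSome _ _ _ hc2.1 _ _ hG2]
    · rw [pvZipComposeGap _ _ r1 g1 h1 hG1, pvZipComposeGap _ _ r2 g2 h2 hG2]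

theorem pvZipRepl (w : Nat) (p : List Nat) : ∀ (g : List (List Char)),
    List.zipWith (fun s row => s ++ pvRender w row p) (List.replicate g.length []) g
      = g.map (fun row => pvRender w row p) := by
  intro g
  induction g with
  | nil => simp
  | cons b g ih => simpa [List.replicate_succ] using ih

theorem pvWidth1 (group1 : List String) :
    ((group1.map String.toList).getD 0 []).length = (group1.getD 0 "").toList.length := by
  cases group1 <;> simp

-- ===== VERDICT (by name: the statement is the Claim_ definition above) =====
theorem align_group_to_group_by_group_spec : Claim_equal_align_group_to_group_by_group := by
  intro min_i min_j group1 group2 group3 _ hpre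
  unfold Spec_align_group_to_group_by_group
  obtain ⟨h3ne, hcond⟩ := hpre
  simp only [align_group_to_group_by_group, align_group_to_group_by_group_alt]
  by_cases hg : (group3.getD 0 "").toList = []
  · rw [if_pos hg, hg]
    simp only [List.length_nil, List.range_zero, List.foldl_nil, List.map_replicate,
      List.length_map]
    have hmk : String.mk ([] : List Char) = "" := rfl
    rw [hmk]
    rw [show ((group1 ++ group2).map (fun _ => "") : List String)
        = List.replicate (group1 ++ group2).length "" from List.map_const' ..]
    simp
  · have hcond' := hcond (fun h => hg (by rw [h]; rfl))
    obtain ⟨hlen3, hle, hg1, hg2, _, _, hrows1, hrows2⟩ := hcond'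
    have hG1 : ∀ row ∈ group1.map String.toList,
        ((group1.map String.toList).getD 0 []).length ≤ row.length := by
      intro row hrow
      obtain ⟨s, hs, rfl⟩ := List.mem_map.mp hrow
      rw [pvWidth1 group1]
      exact hrows1 s hs
    have hG2 : ∀ row ∈ group2.map String.toList,
        ((group2.map String.toList).getD 0 []).length ≤ row.length := by
      intro row hrow
      obtain ⟨s, hs, rfl⟩ := List.mem_map.mp hrow
      rw [pvWidth1 group2]
      exact hrows2 s hs
    rw [if_neg hg]
    rw [pvAStep_eq_core]
    rw [pvFoldRangeZip
      (pvACoreZ (PySem.List.pyGetD group1 min_i "").toList (PySem.List.pyGetD group2 min_j "").toList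
        ((group1.map String.toList).getD 0 []).length ((group2.map String.toList).getD 0 []).length
        (group1.map String.toList) (group2.map String.toList))
      (group3.getD 0 "").toList (group3.getD 1 "").toList hle]
    rw [show (group1.map String.toList).length + (group2.map String.toList).length
          = group1.length + group2.length by simp]
    rw [List.replicate_add]
    rw [pvAfold _ _ _ _ _ _ hG1 hG2 _ (List.replicate group1.length [])
      (List.replicate group2.length []) 0 0 (by simp) (by simp)]
    rw [pvBfold]
    simp only [List.nil_append]
    rw [show List.replicate group1.length ([] : List Char)
          = List.replicate (group1.map String.toList).length [] by simp]
    rw [show List.replicate group2.length ([] : List Char)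
          = List.replicate (group2.map String.toList).length [] by simp]
    rw [pvZipRepl, pvZipRepl]
    rw [pvWidth1 group1, pvWidth1 group2]
    simp [List.map_map, Function.comp_def]
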